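-- pv_equiv track=rewrite | github.com/luisrgpt/SenseAct | development/python_3_7_pycharm_2019_1_1/implementation/senseact/evaluation/get_measurement_cost.py | get_measurement_cost
-- ===== SOURCE A (Python) =====
-- from itertools import \
--   repeat
--
-- def get_measurement_cost(
--     chromosome,
--     amount,
--     settings,
-- ):
--
--   type_costs = (
--     y
--     for x in settings['probe']['types'].values()
--     for y in repeat(x, amount)
--   )
--
--   measurement_cost = 0
--   for flipped, type_cost in zip(chromosome, type_costs):
--     if flipped:
--       measurement_cost += type_cost
--
--   return measurement_cost
-- ===== SOURCE B (Python) =====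
-- def get_measurement_cost(
--     chromosome,
--     amount,
--     settings,
-- ):
--   # Count the flipped bits inside each type's block and add cost*count,
--   # instead of streaming repeated costs and adding one cost per flipped bit.
--   if amount <= 0:
--     return 0
--   total = 0
--   for j, cost in enumerate(settings['probe']['types'].values()):
--     block = chromosome[j * amount:(j + 1) * amount]
--     flips = 0
--     for bit in block:
--       if bit:
--         flips += 1
--     total += cost * flips
--   return total
-- ===== Notes on version B (the rewrite author's own statement) =====
-- stated objective: alternative
-- what changed: Replaces A's per-flipped-bit accumulation over a lazily repeated cost stream by a two-stage block scheme: for each type, count the flipped bits in its slice of the chromosome and add cost*count once.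
import Mathlib
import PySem

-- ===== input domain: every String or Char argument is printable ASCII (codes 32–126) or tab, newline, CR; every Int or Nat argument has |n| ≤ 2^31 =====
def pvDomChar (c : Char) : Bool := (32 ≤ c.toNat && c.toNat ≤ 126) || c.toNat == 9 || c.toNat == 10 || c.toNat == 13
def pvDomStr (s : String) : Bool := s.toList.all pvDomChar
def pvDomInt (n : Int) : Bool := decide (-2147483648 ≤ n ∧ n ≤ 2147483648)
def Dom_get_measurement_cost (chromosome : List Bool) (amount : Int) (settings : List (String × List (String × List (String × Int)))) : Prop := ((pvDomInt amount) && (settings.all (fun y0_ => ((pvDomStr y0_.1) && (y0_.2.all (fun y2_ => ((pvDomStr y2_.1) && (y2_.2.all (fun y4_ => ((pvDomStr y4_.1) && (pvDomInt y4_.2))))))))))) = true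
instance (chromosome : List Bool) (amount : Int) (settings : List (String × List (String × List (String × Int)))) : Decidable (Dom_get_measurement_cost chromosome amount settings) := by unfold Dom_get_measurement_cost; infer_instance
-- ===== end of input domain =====

-- B replaces A's per-flipped-bit accumulation over a repeated-cost stream by counting the
-- flipped bits in each type's chromosome block and adding cost*count once (objective: alternative).


-- ===== PORT A =====
-- settings['probe']['types'].values(); repeat(x, amount) is empty for amount ≤ 0 (hence .toNat)
def get_measurement_cost (chromosome : List Bool) (amount : Int) (settings : List (String × List (String × List (String × Int)))) : Int :=
  match (PySem.Dict.mk settings).get? "probe" with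
  | none => 0        -- unreachable under Pre_ (Python raises KeyError)
  | some probe =>
    match (PySem.Dict.mk probe).get? "types" with
    | none => 0      -- unreachable under Pre_ (Python raises KeyError)
    | some types =>
      (chromosome.zip (((PySem.Dict.mk types).values).flatMap (fun x => List.replicate amount.toNat x))).foldl
        (fun measurement_cost p => if p.1 then measurement_cost + p.2 else measurement_cost) 0

-- ===== PORT B =====
-- inner `for bit in block:` counting loop of Source B
def gmcBlockFlips (block : List Bool) : Int :=
  block.foldl (fun flips b => if b then flips + 1 else flips) 0

-- outer `for j, cost in enumerate(...):` loop of Source B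
def gmcLoop (chromosome : List Bool) (amount : Int) : List Int → Nat → Int → Int
  | [], _, total => total
  | cost :: rest, j, total =>
    let block := PySem.List.slice chromosome (some ((j : Int) * amount)) (some (((j : Int) + 1) * amount))
    gmcLoop chromosome amount rest (j + 1) (total + cost * gmcBlockFlips block)

def get_measurement_cost_alt (chromosome : List Bool) (amount : Int) (settings : List (String × List (String × List (String × Int)))) : Int :=
  match (PySem.Dict.mk settings).get? "probe" with
  | none => 0        -- unreachable under Pre_ (Python raises KeyError)
  | some probe =>
    match (PySem.Dict.mk probe).get? "types" with
    | none => 0      -- unreachable under Pre_ (Python raises KeyError)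
    | some types =>
      if amount ≤ 0 then 0
      else gmcLoop chromosome amount ((PySem.Dict.mk types).values) 0 0

-- ===== PRECONDITION & SPEC =====
-- Python A raises KeyError unless settings has key 'probe' whose value has key 'types'.
def Pre_get_measurement_cost (chromosome : List Bool) (amount : Int) (settings : List (String × List (String × List (String × Int)))) : Prop :=
  ∃ probe, (PySem.Dict.mk settings).get? "probe" = some probe ∧ ((PySem.Dict.mk probe).get? "types").isSome
instance (chromosome : List Bool) (amount : Int) (settings : List (String × List (String × List (String × Int)))) : Decidable (Pre_get_measurement_cost chromosome amount settings) := by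
  unfold Pre_get_measurement_cost
  cases h : (PySem.Dict.mk settings).get? "probe" with
  | none => exact .isFalse (by simp)
  | some probe => exact decidable_of_iff (((PySem.Dict.mk probe).get? "types").isSome) (by simp)

def pvWitness_get_measurement_cost : List Bool × Int × (List (String × List (String × List (String × Int)))) :=
  ([true, false, true], 1, [("probe", [("types", [("a", 3), ("b", 5)])])])

def Spec_get_measurement_cost (chromosome : List Bool) (amount : Int) (settings : List (String × List (String × List (String × Int)))) (out : Int) : Prop := out = get_measurement_cost_alt chromosome amount settings
instance (chromosome : List Bool) (amount : Int) (settings : List (String × List (String × List (String × Int)))) (out : Int) : Decidable (Spec_get_measurement_cost chromosome amount settings out) := by unfold Spec_get_measurement_cost; infer_instance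

-- ===== CLAIM (what is proved, stated in full; the proofs are below) =====
def Claim_equal_get_measurement_cost : Prop := ∀ (chromosome : List Bool) (amount : Int) (settings : List (String × List (String × List (String × Int)))), Dom_get_measurement_cost chromosome amount settings → Pre_get_measurement_cost chromosome amount settings → Spec_get_measurement_cost chromosome amount settings (get_measurement_cost chromosome amount settings)

-- ===== LEMMAS AND PROOFS =====

-- A's fold step, abbreviated for the lemmas
def gmcStep (acc : Int) (p : Bool × Int) : Int := if p.1 then acc + p.2 else acc

theorem gmc_zip_replicate (l : List Bool) (k : Nat) (c : Int) :
    l.zip (List.replicate k c) = (l.take k).map (fun b => (b, c)) := by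
  induction l generalizing k with
  | nil => simp
  | cons b l ih =>
    cases k with
    | zero => simp
    | succ k => simp [List.replicate_succ, ih, List.map_take]

theorem gmc_zip_append (l : List Bool) (ys zs : List Int) :
    l.zip (ys ++ zs) = (l.take ys.length).zip ys ++ (l.drop ys.length).zip zs := by
  induction ys generalizing l with
  | nil => simp
  | cons y ys ih =>
    cases l with
    | nil => simp
    | cons b l => simp [ih]

theorem gmc_flips_acc (l : List Bool) : ∀ t : Int,
    l.foldl (fun flips b => if b then flips + 1 else flips) t = t + gmcBlockFlips l := by
  induction l with
  | nil => intro t; simp [gmcBlockFlips]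
  | cons b l ih =>
    intro t
    simp only [gmcBlockFlips, List.foldl_cons] at *
    rw [ih, ih (if b then 0 + 1 else 0)]
    split <;> ring

theorem gmc_map_fold (c : Int) (l : List Bool) : ∀ t : Int,
    ((l.map (fun b => (b, c))).foldl gmcStep t) = t + c * gmcBlockFlips l := by
  induction l with
  | nil => intro t; simp [gmcBlockFlips]
  | cons b l ih =>
    intro t
    simp only [List.map_cons, List.foldl_cons, gmcStep]
    rw [ih]
    have : gmcBlockFlips (b :: l) = (if b then (0:Int) + 1 else 0) + gmcBlockFlips l := by
      simp only [gmcBlockFlips, List.foldl_cons]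
      exact gmc_flips_acc l _
    rw [this]
    split <;> ring

theorem gmcLoop_eq (chromosome : List Bool) (amount : Int) (hpos : 0 < amount) :
    ∀ (ts : List Int) (j : Nat) (total : Int),
      gmcLoop chromosome amount ts j total =
        ((chromosome.drop (j * amount.toNat)).zip
          (ts.flatMap (fun x => List.replicate amount.toNat x))).foldl gmcStep total := by
  intro ts
  induction ts with
  | nil => intro j total; simp [gmcLoop]
  | cons c rest ih =>
    intro j total
    set k := amount.toNat with hk
    have hka : ((k : Nat) : Int) = amount := Int.toNat_of_nonneg (by omega)
    have ha : (j : Int) * amount = ((j * k : Nat) : Int) := by rw [← hka]; push_cast; ring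
    have hb : ((j : Int) + 1) * amount = (((j + 1) * k : Nat) : Int) := by rw [← hka]; push_cast; ring
    show gmcLoop chromosome amount rest (j + 1)
        (total + c * gmcBlockFlips (PySem.List.slice chromosome (some ((j : Int) * amount)) (some (((j : Int) + 1) * amount)))) = _
    rw [ha, hb, PySem.List.slice_natCast]
    have hkk : (j + 1) * k - j * k = k := by
      have : (j + 1) * k = j * k + k := by ring
      omega
    rw [hkk]
    rw [ih (j + 1) _]
    rw [List.flatMap_cons, gmc_zip_append, List.foldl_append, List.length_replicate]
    rw [gmc_zip_replicate, List.take_take, Nat.min_self, gmc_map_fold]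
    rw [List.drop_drop]
    congr 2
    ring

-- ===== VERDICT (by name: the statement is the Claim_ definition above) =====
theorem get_measurement_cost_spec : Claim_equal_get_measurement_cost := by
  intro chromosome amount settings _ hpre
  obtain ⟨probe, hprobe, htypes⟩ := hpre
  obtain ⟨types, htypes⟩ := Option.isSome_iff_exists.mp htypes
  unfold Spec_get_measurement_cost get_measurement_cost get_measurement_cost_alt
  simp only [hprobe, htypes]
  by_cases hle : amount ≤ 0
  · have h0 : amount.toNat = 0 := by omega
    have hfm : List.flatMap (fun x : Int => List.replicate amount.toNat x)
        (((PySem.Dict.mk types).values)) = [] := by simp [h0]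
    rw [hfm]
    simp [hle]
  · rw [if_neg hle, gmcLoop_eq chromosome amount (by omega)]
    simp only [Nat.zero_mul, List.drop_zero]
    rfl
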